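-- pv_equiv track=rewrite | github.com/quantum-programming/RoM-handbook | exputils/once/make_perm_Amat_by_LCgraphs.py | LCgraph_orbit
-- ===== SOURCE A (Python) =====
-- from itertools import accumulate, product
-- from typing import Iterable, List, Set, Tuple
--
-- def LCgraph_orbit(n: int, A: List[int]) -> Set[Tuple[int, ...]]:
--     eye = [1 << i for i in range(n)]
--     XZ_tableau = eye + A
--     iterators = []
--     for i in range(n):
--         it = []
--         col_pairs = []
--         for d in range(6):
--             X = XZ_tableau[i]
--             Z = XZ_tableau[i + n]
--             if d % 3 == 1:
--                 Z ^= X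
--             if d % 3 == 2:
--                 X ^= Z
--             if d % 2:
--                 X, Z = Z, X
--             pair = (X, Z)
--             if pair not in col_pairs:
--                 it.append(d)
--                 col_pairs.append(pair)
--         iterators.append(it)
--
--     orbit = set()
--     for p in product(*iterators):
--         tableau = XZ_tableau.copy()
--         for i, d in enumerate(p):
--             if d % 3 == 1:
--                 tableau[i + n] ^= tableau[i]
--             if d % 3 == 2:
--                 tableau[i] ^= tableau[i + n]
--             if d % 2:
--                 tableau[i], tableau[i + n] = tableau[i + n], tableau[i]
--         orbit.add(tuple(tableau))
--     return orbit
-- ===== SOURCE B (Python) =====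
-- def LCgraph_orbit(n, A):
--     XZ = [1 << i for i in range(n)] + A
--     frontier = [tuple(XZ)]
--     for i in range(n):
--         new = []
--         for t in frontier:
--             X, Z = t[i], t[i + n]
--             variants = []
--             for x, z in ((X, Z), (X ^ Z, X), (X ^ Z, Z), (Z, X), (X, Z ^ X), (Z, Z ^ X)):
--                 u = list(t)
--                 u[i], u[i + n] = x, z
--                 v = tuple(u)
--                 if v not in variants:
--                     variants.append(v)
--             new.extend(variants)
--         frontier = new
--     return set(frontier)
-- ===== Notes on version B (the rewrite author's own statement) =====
-- stated objective: alternative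
-- what changed: B drops A's precomputation of per-qubit op-index lists, the global itertools.product and the op replay on tableau copies; instead it grows the orbit incrementally, one qubit per stage, replacing every frontier tableau by its distinct six local column variants (duplicates can only arise within one parent, so only local dedup is needed) and converting the final frontier to a set.
import Mathlib
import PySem

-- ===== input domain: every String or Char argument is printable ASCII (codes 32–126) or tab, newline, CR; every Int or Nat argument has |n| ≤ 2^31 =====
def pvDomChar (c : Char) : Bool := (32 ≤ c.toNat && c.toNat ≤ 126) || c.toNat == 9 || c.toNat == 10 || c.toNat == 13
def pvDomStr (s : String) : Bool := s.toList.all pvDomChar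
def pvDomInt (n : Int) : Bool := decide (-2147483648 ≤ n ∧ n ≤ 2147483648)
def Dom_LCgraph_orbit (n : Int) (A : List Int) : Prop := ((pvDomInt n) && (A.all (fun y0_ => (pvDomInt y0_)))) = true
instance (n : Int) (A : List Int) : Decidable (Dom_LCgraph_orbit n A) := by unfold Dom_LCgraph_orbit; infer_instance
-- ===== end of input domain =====

-- B drops A's precomputation of per-qubit op-index lists and the global product with op replay;
-- it grows the orbit set stage by stage, one qubit at a time, replacing each tableau by its six
-- local column variants and letting the set deduplicate (objective: alternative).

-- ===== PORT A =====
-- A's single-column transform for a given d (the three if-statements of A's inner loop)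
def pvDstep (X Z d : Int) : Int × Int :=
  let Z1 := if PySem.Int.mod d 3 = 1 then PySem.Int.bxor Z X else Z
  let X1 := if PySem.Int.mod d 3 = 2 then PySem.Int.bxor X Z1 else X
  if PySem.Int.mod d 2 ≠ 0 then (Z1, X1) else (X1, Z1)

-- A's phase-2 loop body: apply op d at qubit i on tableau t (the literal mutation steps)
def pvApplyA (n : Int) (t : List Int) (id : Int × Int) : List Int :=
  let i := id.1
  let d := id.2
  let t1 := if PySem.Int.mod d 3 = 1 then
      PySem.List.pySetD t (i + n)
        (PySem.Int.bxor (PySem.List.pyGetD t (i + n) 0) (PySem.List.pyGetD t i 0))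
    else t
  let t2 := if PySem.Int.mod d 3 = 2 then
      PySem.List.pySetD t1 i
        (PySem.Int.bxor (PySem.List.pyGetD t1 i 0) (PySem.List.pyGetD t1 (i + n) 0))
    else t1
  if PySem.Int.mod d 2 ≠ 0 then
    PySem.List.pySetD (PySem.List.pySetD t2 i (PySem.List.pyGetD t2 (i + n) 0)) (i + n)
      (PySem.List.pyGetD t2 i 0)
  else t2

-- A's inner d-loop at qubit i: collect the d indices giving new (X, Z) pairs
def pvIter (XZ : List Int) (n : Int) (i : Int) : List Int :=
  ((PySem.List.pyRange 0 6 1).foldl (fun (st : List Int × List (Int × Int)) d =>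
      let X := PySem.List.pyGetD XZ i 0          -- indices in range under Pre_
      let Z := PySem.List.pyGetD XZ (i + n) 0
      let pair := pvDstep X Z d
      if st.2.contains pair then st else (st.1 ++ [d], st.2 ++ [pair]))
    ([], [])).1

-- itertools.product(*iterators)
def pvProd (ls : List (List Int)) : List (List Int) :=
  ls.foldr (fun it acc => it.flatMap (fun d => acc.map (fun p => d :: p))) [[]]

def LCgraph_orbit (n : Int) (A : List Int) : List (List Int) :=
  let eye := (PySem.List.pyRange 0 n 1).map (fun i => (1 : Int) <<< i.toNat)
  let XZ := eye ++ A
  let iterators := (PySem.List.pyRange 0 n 1).map (pvIter XZ n)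
  (pvProd iterators).foldl (fun orbit p =>
      PySem.Set.add orbit ((PySem.List.enumerate p 0).foldl (pvApplyA n) XZ)) []

-- ===== PORT B =====
-- the six local (x, z) candidates B writes out for a column pair (X, Z)
def pvSix (X Z : Int) : List (Int × Int) :=
  [(X, Z), (PySem.Int.bxor X Z, X), (PySem.Int.bxor X Z, Z), (Z, X),
   (X, PySem.Int.bxor Z X), (Z, PySem.Int.bxor Z X)]

-- B's inner loops: the distinct variant tableaux of t at qubit i (first occurrences)
def pvExpand (n i : Int) (t : List Int) : List (List Int) :=
  let X := PySem.List.pyGetD t i 0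
  let Z := PySem.List.pyGetD t (i + n) 0
  (pvSix X Z).foldl (fun vs p =>
    let v := PySem.List.pySetD (PySem.List.pySetD t i p.1) (i + n) p.2
    if vs.contains v then vs else vs ++ [v]) []

def LCgraph_orbit_alt (n : Int) (A : List Int) : List (List Int) :=
  let XZ := ((PySem.List.pyRange 0 n 1).map (fun i => (1 : Int) <<< i.toNat)) ++ A
  PySem.Set.ofList ((PySem.List.pyRange 0 n 1).foldl
    (fun frontier i => frontier.foldl (fun nw t => nw ++ pvExpand n i t) []) [XZ])

-- ===== PRECONDITION & SPEC =====
-- Pre_ excludes exactly the inputs where A raises IndexError: n > len(A) makes XZ_tableau[i + n]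
-- out of range for i = len(A).
def Pre_LCgraph_orbit (n : Int) (A : List Int) : Prop := n ≤ (A.length : Int)
instance (n : Int) (A : List Int) : Decidable (Pre_LCgraph_orbit n A) := by
  unfold Pre_LCgraph_orbit; infer_instance

def pvWitness_LCgraph_orbit : Int × List Int := (2, [3, 1])

def Spec_LCgraph_orbit (n : Int) (A : List Int) (out : List (List Int)) : Prop := out = LCgraph_orbit_alt n A
instance (n : Int) (A : List Int) (out : List (List Int)) : Decidable (Spec_LCgraph_orbit n A out) := by unfold Spec_LCgraph_orbit; infer_instance

-- ===== CLAIM (what is proved, stated in full; the proofs are below) =====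
def Claim_equal_LCgraph_orbit : Prop := ∀ (n : Int) (A : List Int), Dom_LCgraph_orbit n A → Pre_LCgraph_orbit n A → Spec_LCgraph_orbit n A (LCgraph_orbit n A)

-- ===== LEMMAS AND PROOFS =====

-- ---- proof-side helpers: the pair-combination normal form both ports are reduced to ----

-- per-qubit deduplicated (X, Z) pair list (first occurrences of the six candidates)
def pvPairs (XZ : List Int) (n : Int) (i : Int) : List (Int × Int) :=
  let X := PySem.List.pyGetD XZ i 0
  let Z := PySem.List.pyGetD XZ (i + n) 0
  let W := PySem.Int.bxor X Z
  [(X, Z), (W, X), (W, Z), (Z, X), (X, W), (Z, W)].foldl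
    (fun ps p => if ps.contains p then ps else ps ++ [p]) []

-- cartesian product of pair lists, kept as (X-prefix, Z-prefix) pairs
def pvCombos : List (List (Int × Int)) → List (List Int × List Int)
  | [] => [([], [])]
  | l :: ls => l.flatMap (fun p => (pvCombos ls).map (fun xz => (p.1 :: xz.1, p.2 :: xz.2)))

-- extend a combination by one chosen pair
def pvExt (c : List Int × List Int) (p : Int × Int) : List Int × List Int :=
  (c.1 ++ [p.1], c.2 ++ [p.2])

-- the tableau after k stages for combination c: columns 0..k-1 and n..n+k-1 replaced
def pvT (XZ : List Int) (N k : Nat) (c : List Int × List Int) : List Int :=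
  c.1 ++ ((XZ.drop k).take (N - k) ++ (c.2 ++ XZ.drop (N + k)))

-- the normal form: fold the assembled tableaux of all combinations into a set
def pvCombosForm (n : Int) (A : List Int) : List (List Int) :=
  let eye := (PySem.List.pyRange 0 n 1).map (fun i => (1 : Int) <<< i.toNat)
  let XZ := eye ++ A
  let pairLists := (PySem.List.pyRange 0 (eye.length : Int) 1).map (pvPairs XZ n)
  let tail := PySem.List.slice XZ (some (2 * (eye.length : Int))) none
  (pvCombos pairLists).foldl
    (fun orbit xz => PySem.Set.add orbit (xz.1 ++ xz.2 ++ tail)) []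

-- ---- A-side: LCgraph_orbit = pvCombosForm ----

theorem pv_map_dstep_range6 (X Z : Int) :
    (PySem.List.pyRange 0 6 1).map (pvDstep X Z) =
      [(X, Z), (PySem.Int.bxor X Z, X), (PySem.Int.bxor X Z, Z), (Z, X),
       (X, PySem.Int.bxor X Z), (Z, PySem.Int.bxor X Z)] := by
  have h : PySem.List.pyRange 0 6 1 = [0,1,2,3,4,5] := by decide
  rw [h]
  simp only [List.map, pvDstep]
  norm_num [PySem.Int.mod]
  simp [PySem.Int.bxor_comm Z X]

theorem pv_dedup_fold (f : Int → Int × Int) (ds : List Int) (a1 : List Int) (a2 : List (Int × Int))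
    (h : a2 = a1.map f) :
    (ds.foldl (fun (st : List Int × List (Int × Int)) d =>
        let p := f d
        if st.2.contains p then st else (st.1 ++ [d], st.2 ++ [p])) (a1, a2)).2 =
      (ds.foldl (fun (st : List Int × List (Int × Int)) d =>
        let p := f d
        if st.2.contains p then st else (st.1 ++ [d], st.2 ++ [p])) (a1, a2)).1.map f ∧
    (ds.foldl (fun (st : List Int × List (Int × Int)) d =>
        let p := f d
        if st.2.contains p then st else (st.1 ++ [d], st.2 ++ [p])) (a1, a2)).2 =
      (ds.map f).foldl (fun ps p => if ps.contains p then ps else ps ++ [p]) a2 := by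
  induction ds generalizing a1 a2 with
  | nil => simp [h]
  | cons d ds ih =>
    simp only [List.foldl_cons, List.map_cons]
    by_cases hc : f d ∈ a2
    · simpa [hc] using ih a1 a2 h
    · simpa [hc] using ih (a1 ++ [d]) (a2 ++ [f d]) (by simp [h])

theorem pv_combos_map (It : Int → List Int) (f : Int → Int → Int × Int) (idxs : List Int) :
    pvCombos (idxs.map (fun i => (It i).map (f i))) =
      (pvProd (idxs.map It)).map
        (fun ds => ((idxs.zip ds).map (fun q => (f q.1 q.2).1),
                    (idxs.zip ds).map (fun q => (f q.1 q.2).2))) := by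
  induction idxs with
  | nil => simp [pvCombos, pvProd]
  | cons i idxs ih =>
    simp only [pvProd] at ih ⊢
    simp only [List.map_cons, List.foldr_cons, pvCombos, ih]
    simp only [List.flatMap_map, List.map_flatMap, List.map_map]
    apply List.flatMap_congr
    intro x _
    apply List.map_congr_left
    intro ds _
    simp

theorem pv_step (N : Nat) (t : List Int) (i : Nat) (d : Int)
    (hi : i < N) (hL : 2 * N ≤ t.length) :
    pvApplyA (N : Int) t ((i : Nat), d) =
      (t.set i (pvDstep (t.getD i 0) (t.getD (i + N) 0) d).1).set (i + N)
        (pvDstep (t.getD i 0) (t.getD (i + N) 0) d).2 := by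
  have hiN : ((i : Int) + (N : Int)) = ((i + N : Nat) : Int) := by omega
  have hne : i + N ≠ i := by omega
  have hiL : i < t.length := by omega
  have hiNL : i + N < t.length := by omega
  have gB : ∀ v : Int, (t.set (i+N) v)[i+N]?.getD 0 = v := by
    intro v; simp [hiNL]
  have gA : ∀ v : Int, (t.set (i+N) v)[i]?.getD 0 = t[i]?.getD 0 := by
    intro v; simp [List.getElem?_set_ne hne]
  have gE : ∀ v : Int, (t.set i v)[i+N]?.getD 0 = t[i+N]?.getD 0 := by
    intro v; simp [List.getElem?_set_ne (Ne.symm hne)]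
  have gF : ∀ v : Int, (t.set i v)[i]?.getD 0 = v := by
    intro v; simp [hiL]
  have gC : ∀ v w : Int, ((t.set (i+N) v).set i w)[i]?.getD 0 = w := by
    intro v w; simp [hiL]
  have gD : ∀ v w : Int, ((t.set (i+N) v).set i w)[i+N]?.getD 0 = v := by
    intro v w
    rw [List.getElem?_set_ne (Ne.symm hne)]; simp [hiNL]
  have gC' : ∀ v w : Int, ((t.set i w).set (i+N) v)[i]?.getD 0 = w := by
    intro v w
    rw [List.getElem?_set_ne hne]; simp [hiL]
  have gD' : ∀ v w : Int, ((t.set i w).set (i+N) v)[i+N]?.getD 0 = v := by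
    intro v w; simp [hiNL]
  have scomm : ∀ (l : List Int) (v w : Int), (l.set (i+N) v).set i w = (l.set i w).set (i+N) v := by
    intro l v w; exact List.set_comm _ _ hne
  have selfi : t.set i (t[i]?.getD 0) = t := by
    have : t[i]?.getD 0 = t[i] := by simp [hiL]
    rw [this]; exact List.set_getElem_self hiL
  have selfiN : t.set (i+N) (t[i+N]?.getD 0) = t := by
    have : t[i+N]?.getD 0 = t[i+N] := by simp [hiNL]
    rw [this]; exact List.set_getElem_self hiNL
  have selfiN' : ∀ v : Int, (t.set i v).set (i+N) (t[i+N]?.getD 0) = t.set i v := by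
    intro v
    rw [← gE v]
    have hl : i + N < (t.set i v).length := by simpa using hiNL
    rw [List.getElem?_eq_getElem hl]
    exact List.set_getElem_self hl
  simp only [pvApplyA, pvDstep, hiN, PySem.List.pySetD_natCast, PySem.List.pyGetD_natCast]
  split_ifs with h1 h2 h3 <;>
    simp [List.getD_eq_getElem?_getD, gA, gB, gC', gD', gE, gF, scomm, List.set_set, selfi, selfiN, selfiN']

theorem pv_fold (N : Nat) (ds : List Int) : ∀ (k : Nat) (t : List Int),
    2*N ≤ t.length → k + ds.length ≤ N →
    (((PySem.List.enumerate ds (k:Int)).foldl (pvApplyA (N:Int)) t).length = t.length ∧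
     ∀ j : Nat,
      ((PySem.List.enumerate ds (k:Int)).foldl (pvApplyA (N:Int)) t).getD j 0 =
        if k ≤ j ∧ j < k + ds.length then
          (pvDstep (t.getD j 0) (t.getD (j+N) 0) (ds.getD (j-k) 0)).1
        else if k+N ≤ j ∧ j < k + ds.length + N then
          (pvDstep (t.getD (j-N) 0) (t.getD j 0) (ds.getD (j-N-k) 0)).2
        else t.getD j 0) := by
  induction ds with
  | nil =>
    intro k t hL hk
    constructor
    · simp [PySem.List.enumerate_nil]
    · intro j
      simp only [PySem.List.enumerate_nil, List.foldl_nil, List.length_nil, Nat.add_zero]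
      rw [if_neg (by omega), if_neg (by omega)]
  | cons d ds ih =>
    intro k t hL hk
    have hkN : k < N := by simp at hk; omega
    have hcast : ((k : Int) + 1) = (((k+1 : Nat)) : Int) := by omega
    rw [PySem.List.enumerate_cons, List.foldl_cons, hcast]
    have hstep := pv_step N t k d hkN hL
    rw [hstep]
    set P := pvDstep (t.getD k 0) (t.getD (k + N) 0) d with hP
    set t1 := (t.set k P.1).set (k + N) P.2 with ht1def
    have hlen1 : t1.length = t.length := by simp [ht1def]
    have hkL : k < t.length := by omega
    have hkNL : k + N < t.length := by omega
    have ht1 : ∀ m : Nat, t1.getD m 0 = if m = k+N then P.2 else if m = k then P.1 else t.getD m 0 := by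
      intro m
      by_cases hm1 : m = k+N
      · rw [hm1, if_pos rfl]; simp [ht1def, List.getD, hkNL]
      · rw [if_neg hm1]
        by_cases hm2 : m = k
        · rw [hm2, if_pos rfl, ht1def, List.getD_eq_getElem?_getD,
            List.getElem?_set_ne (by omega : k + N ≠ k), List.getElem?_set, if_pos hkL]
          simp
        · rw [if_neg hm2]
          simp [ht1def, List.getD, List.getElem?_set_ne (by omega : k + N ≠ m),
            List.getElem?_set_ne (by omega : k ≠ m)]
    obtain ⟨ihlen, ihget⟩ := ih (k+1) t1 (by omega) (by simp at hk ⊢; omega)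
    refine ⟨by rw [ihlen, hlen1], ?_⟩
    intro j
    rw [ihget j]
    simp only [List.length_cons] at hk ⊢
    have hk' : k + ds.length + 1 ≤ N := by omega
    by_cases c1 : j = k
    · rw [c1]
      rw [if_neg (by omega), if_neg (by omega), ht1, if_neg (by omega), if_pos rfl,
        if_pos (by omega)]
      have hz : k - k = 0 := by omega
      rw [hz, List.getD_cons_zero, hP]
    · by_cases c2 : j = k + N
      · rw [c2]
        rw [if_neg (by omega), if_neg (by omega), ht1, if_pos rfl,
          if_neg (by omega), if_pos (by omega)]
        have h1 : k + N - N = k := by omega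
        rw [h1, Nat.sub_self, List.getD_cons_zero, hP]
      · by_cases r1 : k+1 ≤ j ∧ j < k+1+ds.length
        · have e1 : t1.getD j 0 = t.getD j 0 := by
            rw [ht1, if_neg c2, if_neg c1]
          have e2 : t1.getD (j+N) 0 = t.getD (j+N) 0 := by
            rw [ht1, if_neg (by omega), if_neg (by omega)]
          have e3 : j - k = (j - (k+1)) + 1 := by omega
          rw [if_pos r1, if_pos (by omega), e1, e2, e3, List.getD_cons_succ]
        · by_cases r2 : k+1+N ≤ j ∧ j < k+1+ds.length+N
          · have e1 : t1.getD (j-N) 0 = t.getD (j-N) 0 := by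
              rw [ht1, if_neg (by omega), if_neg (by omega)]
            have e2 : t1.getD j 0 = t.getD j 0 := by
              rw [ht1, if_neg c2, if_neg c1]
            have e3 : j - N - k = (j - N - (k+1)) + 1 := by omega
            rw [if_neg r1, if_pos r2, if_neg (by omega), if_pos (by omega), e1, e2, e3,
              List.getD_cons_succ]
          · rw [if_neg r1, if_neg r2, if_neg (by omega), if_neg (by omega), ht1,
              if_neg c2, if_neg c1]

-- every member of A's foldr cartesian product has one entry per iterator
theorem pv_prod_len (ls : List (List Int)) (ds : List Int)
    (h : ds ∈ pvProd ls) : ds.length = ls.length := by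
  induction ls generalizing ds with
  | nil => simp [pvProd] at h; simp [h]
  | cons l ls ih =>
    simp only [pvProd, List.foldr_cons, List.mem_flatMap, List.mem_map] at h
    obtain ⟨d, _, p, hp, rfl⟩ := h
    exact congrArg (· + 1) (ih p (by simpa [pvProd] using hp))

-- the full phase-2 replay on one combination, assembled as concatenation
theorem pv_build (N : Nat) (XZ : List Int) (hL : 2*N ≤ XZ.length) (ds : List Int)
    (hds : ds.length = N) :
    (PySem.List.enumerate ds 0).foldl (pvApplyA (N : Int)) XZ =
      ((PySem.List.pyRange 0 (N : Int) 1).zip ds).map (fun q =>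
        (pvDstep (PySem.List.pyGetD XZ q.1 0) (PySem.List.pyGetD XZ (q.1 + (N : Int)) 0) q.2).1)
      ++ ((PySem.List.pyRange 0 (N : Int) 1).zip ds).map (fun q =>
        (pvDstep (PySem.List.pyGetD XZ q.1 0) (PySem.List.pyGetD XZ (q.1 + (N : Int)) 0) q.2).2)
      ++ XZ.drop (2*N) := by
  obtain ⟨hlen, hget⟩ := pv_fold N ds 0 XZ hL (by omega)
  simp only [Nat.cast_zero] at hlen hget
  have hzipl : ((PySem.List.pyRange 0 (N : Int) 1).zip ds).length = N := by
    simp [List.length_zip, PySem.List.length_pyRange_one, hds]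
  apply List.ext_getElem
  · simp [hlen, hzipl]
    omega
  · intro j hj hj2
    have hjL : j < XZ.length := by rw [← hlen]; exact hj
    have hgd : ∀ (l : List Int) (m : Nat) (hm : m < l.length), l[m] = l.getD m 0 := by
      intro l m hm; rw [List.getD_eq_getElem l 0 hm]
    rw [hgd _ j hj, hgd _ j hj2, hget j]
    have hmapget : ∀ (g : Int × Int → Int) (m : Nat) (hm : m < N),
        (List.map g ((PySem.List.pyRange 0 (N:Int) 1).zip ds)).getD m 0 =
          g (((PySem.List.pyRange 0 (N:Int) 1).zip ds)[m]'(by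
            rw [hzipl]; omega)) := by
      intro g m hm
      rw [List.getD_eq_getElem _ 0 (by rw [List.length_map, hzipl]; omega), List.getElem_map]
    by_cases c1 : j < N
    · rw [if_pos (by omega)]
      rw [List.getD_append _ _ _ j (by simp [hzipl]; omega),
          List.getD_append _ _ _ j (by simp [hzipl]; omega)]
      rw [hmapget _ j (by omega)]
      rw [List.getElem_zip]
      have hidx : (PySem.List.pyRange 0 (N:Int) 1)[j]'(by rw [PySem.List.length_pyRange_one]; omega) = (j : Int) := by
        rw [PySem.List.getElem_pyRange_one]; omega
      rw [hidx]
      have hcast : ((j : Int) + (N : Int)) = (((j + N : Nat)) : Int) := by omega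
      have hdg : ∀ (m : Nat) (hm : m < ds.length), ds[m] = ds.getD m 0 := by
        intro m hm; rw [List.getD_eq_getElem ds 0 hm]
      rw [hcast, PySem.List.pyGetD_natCast, PySem.List.pyGetD_natCast, hdg j (by omega)]
      simp
    · rw [if_neg (by omega)]
      by_cases c2 : j < 2*N
      · rw [if_pos (by omega)]
        rw [List.getD_append _ _ _ j (by simp [hzipl]; omega),
            List.getD_append_right _ _ _ j (by simp [hzipl]; omega)]
        simp only [List.length_map, hzipl]
        rw [hmapget _ (j - N) (by omega)]
        rw [List.getElem_zip]
        have hidx : (PySem.List.pyRange 0 (N:Int) 1)[j - N]'(by rw [PySem.List.length_pyRange_one]; omega) = ((j - N : Nat) : Int) := by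
          rw [PySem.List.getElem_pyRange_one]; omega
        rw [hidx]
        have hcast : (((j - N : Nat) : Int) + (N : Int)) = ((j : Nat) : Int) := by omega
        have hdg : ∀ (m : Nat) (hm : m < ds.length), ds[m] = ds.getD m 0 := by
          intro m hm; rw [List.getD_eq_getElem ds 0 hm]
        rw [hcast, PySem.List.pyGetD_natCast, PySem.List.pyGetD_natCast, hdg (j - N) (by omega)]
        simp
      · rw [if_neg (by omega)]
        rw [List.getD_append_right _ _ _ j (by simp [hzipl]; omega)]
        have hdr : ∀ m, (XZ.drop (2*N)).getD m 0 = XZ.getD (2*N + m) 0 := by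
          intro m; simp [List.getD, List.getElem?_drop]
        rw [hdr]
        congr 1
        simp [hzipl]
        omega

-- pvPairs is A's iterator list pushed through the column transform
theorem pv_pairs_eq (XZ : List Int) (n i : Int) :
    pvPairs XZ n i = (pvIter XZ n i).map
      (fun d => pvDstep (PySem.List.pyGetD XZ i 0) (PySem.List.pyGetD XZ (i + n) 0) d) := by
  obtain ⟨h1, h2⟩ := pv_dedup_fold
      (fun d => pvDstep (PySem.List.pyGetD XZ i 0) (PySem.List.pyGetD XZ (i + n) 0) d)
      (PySem.List.pyRange 0 6 1) [] [] (by simp)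
  unfold pvPairs pvIter
  simp only []
  rw [← pv_map_dstep_range6 (PySem.List.pyGetD XZ i 0) (PySem.List.pyGetD XZ (i + n) 0)]
  exact (h2.symm.trans h1)

-- the recursive product of pair lists is A's product of iterators, transformed pointwise
theorem pv_combos_spec (XZ : List Int) (n : Int) (idxs : List Int) :
    pvCombos (idxs.map (pvPairs XZ n)) =
      (pvProd (idxs.map (pvIter XZ n))).map
        (fun ds => ((idxs.zip ds).map (fun q =>
            (pvDstep (PySem.List.pyGetD XZ q.1 0) (PySem.List.pyGetD XZ (q.1 + n) 0) q.2).1),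
          (idxs.zip ds).map (fun q =>
            (pvDstep (PySem.List.pyGetD XZ q.1 0) (PySem.List.pyGetD XZ (q.1 + n) 0) q.2).2))) := by
  rw [List.map_congr_left (fun i _ => pv_pairs_eq XZ n i)]
  exact pv_combos_map (pvIter XZ n)
    (fun i d => pvDstep (PySem.List.pyGetD XZ i 0) (PySem.List.pyGetD XZ (i + n) 0) d) idxs

-- A's port equals the pair-combination normal form
theorem pv_main (N : Nat) (A : List Int) (hNA : N ≤ A.length) :
    LCgraph_orbit (N : Int) A = pvCombosForm (N : Int) A := by
  unfold LCgraph_orbit pvCombosForm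
  simp only []
  set XZ := (PySem.List.pyRange 0 ((N : Nat) : Int) 1).map (fun i => (1:Int) <<< i.toNat) ++ A with hXZ
  have heyelen : ((PySem.List.pyRange 0 ((N : Nat) : Int) 1).map (fun i => (1:Int) <<< i.toNat)).length = N := by
    simp [PySem.List.length_pyRange_one]
  rw [heyelen]
  rw [pv_combos_spec XZ ((N : Nat) : Int) (PySem.List.pyRange 0 ((N : Nat) : Int) 1)]
  rw [show (2 * ((N : Nat) : Int)) = (((2*N : Nat)) : Int) from by norm_num]
  rw [PySem.List.slice_from_natCast]
  rw [List.foldl_map]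
  refine (PySem.List.foldl_congr_mem _ _ _ _ ?_).symm
  intro acc ds hds
  have hlen : ds.length = N := by
    have h := pv_prod_len _ _ hds
    simpa [PySem.List.length_pyRange_one] using h
  have hL : 2*N ≤ XZ.length := by
    rw [hXZ]
    simp [PySem.List.length_pyRange_one]
    omega
  exact (congrArg (PySem.Set.add acc) (pv_build N XZ hL ds hlen)).symm

-- ---- B-side: LCgraph_orbit_alt = pvCombosForm ----

-- adding images under an injective-on-P function commutes with map
theorem pv_foldl_add_map_inj {α β : Type} [BEq α] [LawfulBEq α] [BEq β] [LawfulBEq β]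
    (f : α → β) (P : α → Prop)
    (hinj : ∀ x y, P x → P y → f x = f y → x = y)
    (l s : List α) (hl : ∀ x ∈ l, P x) (hs : ∀ x ∈ s, P x) :
    l.foldl (fun t x => PySem.Set.add t (f x)) (s.map f) =
      (l.foldl PySem.Set.add s).map f := by
  induction l generalizing s with
  | nil => simp
  | cons x l ih =>
    simp only [List.foldl_cons]
    have hmem : f x ∈ s.map f ↔ x ∈ s := by
      constructor
      · intro h
        obtain ⟨y, hy, hfy⟩ := List.mem_map.mp h
        exact (hinj y x (hs y hy) (hl x (by simp)) hfy) ▸ hy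
      · intro h; exact List.mem_map_of_mem h
    rw [PySem.Set.add_eq_ite, PySem.Set.add_eq_ite]
    by_cases hx : x ∈ s
    · rw [if_pos (hmem.mpr hx), if_pos hx]
      exact ih s (fun y hy => hl y (by simp [hy])) hs
    · rw [if_neg (fun h => hx (hmem.mp h)), if_neg hx,
        show List.map f s ++ [f x] = List.map f (s ++ [x]) by simp]
      exact ih (s ++ [x]) (fun y hy => hl y (by simp [hy]))
        (by intro y hy; rcases List.mem_append.mp hy with h | h
            · exact hs y h
            · simp at h; exact h ▸ hl x (by simp))

theorem pv_ofList_map_inj {α β : Type} [BEq α] [LawfulBEq α] [BEq β] [LawfulBEq β]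
    (f : α → β) (hinj : ∀ x y, f x = f y → x = y) (l : List α) :
    PySem.Set.ofList (l.map f) = (PySem.Set.ofList l).map f := by
  rw [PySem.Set.ofList_eq_foldl, PySem.Set.ofList_eq_foldl, List.foldl_map]
  simpa using pv_foldl_add_map_inj f (fun _ => True)
    (fun x y _ _ h => hinj x y h) l [] (by simp) (by simp)

-- pvCombos of an appended last list
theorem pv_combos_append_last (ls : List (List (Int × Int))) (l : List (Int × Int)) :
    pvCombos (ls ++ [l]) = (pvCombos ls).flatMap (fun c => l.map (pvExt c)) := by
  induction ls with
  | nil =>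
    simp only [List.nil_append, pvCombos, List.flatMap_cons, List.flatMap_nil,
      List.append_nil]
    rw [List.map_eq_flatMap]
    apply List.flatMap_congr
    intro p _
    simp [pvExt]
  | cons x ls ih =>
    simp only [List.cons_append, pvCombos, ih]
    rw [List.flatMap_assoc]
    apply List.flatMap_congr
    intro p _
    rw [List.flatMap_map, List.map_flatMap]
    apply List.flatMap_congr
    intro c _
    simp [pvExt]

-- components of pvCombos members have one entry per list
theorem pv_combos_len (ls : List (List (Int × Int))) (c : List Int × List Int)
    (h : c ∈ pvCombos ls) : c.1.length = ls.length ∧ c.2.length = ls.length := by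
  induction ls generalizing c with
  | nil => simp [pvCombos] at h; simp [h]
  | cons l ls ih =>
    simp only [pvCombos, List.mem_flatMap, List.mem_map] at h
    obtain ⟨p, _, c', hc', rfl⟩ := h
    obtain ⟨h1, h2⟩ := ih c' hc'
    simp [h1, h2]

-- pvExt is injective when first components have equal lengths
theorem pv_ext_inj (k : Nat) (c c' : List Int × List Int) (p p' : Int × Int)
    (hc : c.1.length = k ∧ c.2.length = k) (hc' : c'.1.length = k ∧ c'.2.length = k)
    (h : pvExt c p = pvExt c' p') : c = c' ∧ p = p' := by
  unfold pvExt at h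
  obtain ⟨h1, h2⟩ := Prod.mk.injEq .. ▸ h
  obtain ⟨e1, e2⟩ := List.append_inj h1 (by omega)
  obtain ⟨e3, e4⟩ := List.append_inj h2 (by omega)
  simp at e2 e4
  exact ⟨Prod.ext (by simpa using e1) (by simpa using e3), Prod.ext e2 e4⟩

-- pvT is injective on combinations of matching component lengths
theorem pv_T_inj (XZ : List Int) (N k : Nat) (c c' : List Int × List Int)
    (hc : c.1.length = k ∧ c.2.length = k) (hc' : c'.1.length = k ∧ c'.2.length = k)
    (h : pvT XZ N k c = pvT XZ N k c') : c = c' := by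
  unfold pvT at h
  obtain ⟨e1, e2⟩ := List.append_inj h (by omega)
  obtain ⟨_, e3⟩ := List.append_inj e2 (by simp)
  obtain ⟨e4, _⟩ := List.append_inj e3 (by omega)
  exact Prod.ext e1 e4

-- pvPairs as a set of the six candidates
theorem pv_pairs_ofList (XZ : List Int) (n i : Int) :
    pvPairs XZ n i = PySem.Set.ofList
      (pvSix (PySem.List.pyGetD XZ i 0) (PySem.List.pyGetD XZ (i + n) 0)) := by
  rw [PySem.Set.ofList_eq_foldl]
  unfold pvPairs pvSix
  rw [PySem.Int.bxor_comm (PySem.List.pyGetD XZ (i + n) 0) (PySem.List.pyGetD XZ i 0)]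
  rfl
-- reading the untouched columns of a stage-k tableau
theorem pv_T_get (XZ : List Int) (N k : Nat) (c : List Int × List Int)
    (hc : c.1.length = k ∧ c.2.length = k) (hk : k < N) (hL : 2*N ≤ XZ.length) :
    PySem.List.pyGetD (pvT XZ N k c) ((k : Nat) : Int) 0 = XZ.getD k 0 ∧
    PySem.List.pyGetD (pvT XZ N k c) (((k : Nat) : Int) + ((N : Nat) : Int)) 0 = XZ.getD (N + k) 0 := by
  have hkL : k < XZ.length := by omega
  have hNkL : N + k < XZ.length := by omega
  have hdropk : XZ.drop k = XZ[k] :: XZ.drop (k+1) := List.drop_eq_getElem_cons hkL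
  have hmid : (XZ.drop k).take (N - k) = XZ[k] :: (XZ.drop (k+1)).take (N - k - 1) := by
    rw [hdropk, show N - k = (N - k - 1) + 1 by omega, List.take_succ_cons]
    norm_num
  have hdropNk : XZ.drop (N + k) = XZ[N + k] :: XZ.drop (N + k + 1) :=
    List.drop_eq_getElem_cons hNkL
  have hmidlen : ((XZ.drop k).take (N - k)).length = N - k := by
    simp [List.length_take, List.length_drop]; omega
  constructor
  · have hcast : (((k : Nat) : Int)) = ((k : Nat) : Int) := rfl
    rw [PySem.List.pyGetD_natCast]
    unfold pvT
    rw [List.getD_append_right _ _ _ k (by omega)]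
    rw [hc.1, Nat.sub_self, hmid, List.getD_append _ _ _ 0 (by simp), List.getD_cons_zero]
    simp [List.getD_eq_getElem?_getD, List.getElem?_eq_getElem hkL]
  · rw [show (((k : Nat) : Int) + ((N : Nat) : Int)) = (((k + N : Nat)) : Int) by omega,
      PySem.List.pyGetD_natCast]
    unfold pvT
    rw [List.getD_append_right _ _ _ (k+N) (by omega)]
    rw [List.getD_append_right _ _ _ _ (by rw [hmidlen, hc.1]; omega)]
    rw [List.getD_append_right _ _ _ _ (by rw [hmidlen, hc.1, hc.2]; omega)]
    rw [hmidlen, hc.1, hc.2, hdropNk,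
      show k + N - k - (N - k) - k = 0 by omega, List.getD_cons_zero]
    simp [List.getD_eq_getElem?_getD, List.getElem?_eq_getElem hNkL]

-- writing the two chosen columns produces the stage-(k+1) tableau
theorem pv_T_set (XZ : List Int) (N k : Nat) (c : List Int × List Int)
    (hc : c.1.length = k ∧ c.2.length = k) (hk : k < N) (hL : 2*N ≤ XZ.length)
    (p : Int × Int) :
    PySem.List.pySetD (PySem.List.pySetD (pvT XZ N k c) ((k : Nat) : Int) p.1)
        (((k : Nat) : Int) + ((N : Nat) : Int)) p.2 =
      pvT XZ N (k+1) (pvExt c p) := by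
  have hkL : k < XZ.length := by omega
  have hNkL : N + k < XZ.length := by omega
  have hmid : (XZ.drop k).take (N - k) = XZ[k] :: (XZ.drop (k+1)).take (N - k - 1) := by
    rw [List.drop_eq_getElem_cons hkL, show N - k = (N - k - 1) + 1 by omega,
      List.take_succ_cons]
    norm_num
  have hdropNk : XZ.drop (N + k) = XZ[N + k] :: XZ.drop (N + k + 1) :=
    List.drop_eq_getElem_cons hNkL
  have hmidlen : ((XZ.drop (k+1)).take (N - k - 1)).length = N - k - 1 := by
    simp [List.length_take, List.length_drop]; omega
  rw [show (((k : Nat) : Int) + ((N : Nat) : Int)) = (((k + N : Nat)) : Int) by omega,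
    PySem.List.pySetD_natCast, PySem.List.pySetD_natCast]
  unfold pvT pvExt
  rw [hmid]
  have e1 : (c.1 ++ ((XZ[k] :: (XZ.drop (k+1)).take (N-k-1)) ++ (c.2 ++ XZ.drop (N+k)))).set k p.1
      = (c.1 ++ (p.1 :: (XZ.drop (k+1)).take (N-k-1))) ++ (c.2 ++ XZ.drop (N+k)) := by
    rw [List.set_append_right _ _ hc.1.le, hc.1, Nat.sub_self]
    simp
  rw [e1]
  rw [List.set_append_right _ _ (by simp [hc.1, hmidlen]; omega)]
  rw [List.set_append_right _ _ (by simp [hc.1, hc.2, hmidlen]; omega)]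
  rw [hdropNk]
  rw [show k + N - (c.1 ++ (p.1 :: (XZ.drop (k+1)).take (N-k-1))).length - c.2.length = 0 by
    simp [hc.1, hc.2, hmidlen]; omega]
  rw [List.set_cons_zero]
  simp [show N - (k+1) = N - k - 1 by omega, show N + (k+1) = N + k + 1 by omega,
    List.append_assoc]

-- one stage of B's loop expands a stage-k tableau into its distinct successors
theorem pv_expand_eq (XZ : List Int) (N k : Nat) (c : List Int × List Int)
    (hc : c.1.length = k ∧ c.2.length = k) (hk : k < N) (hL : 2*N ≤ XZ.length) :
    pvExpand ((N : Nat) : Int) ((k : Nat) : Int) (pvT XZ N k c) =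
      ((pvPairs XZ ((N : Nat) : Int) ((k : Nat) : Int)).map (pvExt c)).map (pvT XZ N (k+1)) := by
  obtain ⟨g1, g2⟩ := pv_T_get XZ N k c hc hk hL
  have hf : ∀ p : Int × Int,
      PySem.List.pySetD (PySem.List.pySetD (pvT XZ N k c) ((k : Nat) : Int) p.1)
        (((k : Nat) : Int) + ((N : Nat) : Int)) p.2 = pvT XZ N (k+1) (pvExt c p) :=
    fun p => pv_T_set XZ N k c hc hk hL p
  have hinj : ∀ p p' : Int × Int,
      pvT XZ N (k+1) (pvExt c p) = pvT XZ N (k+1) (pvExt c p') → p = p' := by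
    intro p p' h
    have hl : ∀ q : Int × Int, (pvExt c q).1.length = k+1 ∧ (pvExt c q).2.length = k+1 := by
      intro q; simp [pvExt, hc.1, hc.2]
    exact (pv_ext_inj k c c p p' hc hc (pv_T_inj XZ N (k+1) _ _ (hl p) (hl p') h)).2
  unfold pvExpand
  simp only [g1, g2]
  have hfold : (pvSix (XZ.getD k 0) (XZ.getD (N + k) 0)).foldl (fun vs p =>
        let v := PySem.List.pySetD (PySem.List.pySetD (pvT XZ N k c) ((k : Nat) : Int) p.1)
          (((k : Nat) : Int) + ((N : Nat) : Int)) p.2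
        if vs.contains v then vs else vs ++ [v]) [] =
      ((pvSix (XZ.getD k 0) (XZ.getD (N + k) 0)).map
        (fun p => pvT XZ N (k+1) (pvExt c p))).foldl PySem.Set.add [] := by
    rw [List.foldl_map]
    simp only [hf]
    rfl
  rw [hfold, ← PySem.Set.ofList_eq_foldl,
    pv_ofList_map_inj (fun p => pvT XZ N (k+1) (pvExt c p)) hinj _,
    pv_pairs_ofList,
    show ((k : Nat) : Int) + ((N : Nat) : Int) = (((k + N : Nat)) : Int) by omega,
    PySem.List.pyGetD_natCast, PySem.List.pyGetD_natCast, Nat.add_comm k N,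
    List.map_map]
  rfl

-- B's staged loop equals the combination normal form, by induction on the stage count
theorem pv_stages (XZ : List Int) (N : Nat) (hL : 2*N ≤ XZ.length) : ∀ k ≤ N,
    (PySem.List.pyRange 0 ((k : Nat) : Int) 1).foldl
        (fun frontier i => frontier.foldl
          (fun nw t => nw ++ pvExpand ((N : Nat) : Int) i t) []) [XZ] =
      (pvCombos ((PySem.List.pyRange 0 ((k : Nat) : Int) 1).map (pvPairs XZ ((N : Nat) : Int)))).map
        (pvT XZ N k) := by
  intro k
  induction k with
  | zero =>
    intro _
    rw [PySem.List.pyRange_one_eq_nil (by simp)]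
    simp [pvCombos, pvT]
  | succ k ih =>
    intro hk1
    have hk : k < N := by omega
    have ih1 := ih (by omega)
    have hsplit : PySem.List.pyRange 0 (((k+1 : Nat)) : Int) 1 =
        PySem.List.pyRange 0 ((k : Nat) : Int) 1 ++ [((k : Nat) : Int)] := by
      rw [PySem.List.pyRange_one_append 0 ((k : Nat) : Int) (((k+1 : Nat)) : Int) (by omega) (by omega)]
      congr 1
      rw [PySem.List.pyRange_one_cons (by omega), PySem.List.pyRange_one_eq_nil (by omega)]
    have hlen' : ∀ c ∈ pvCombos ((PySem.List.pyRange 0 ((k : Nat) : Int) 1).map (pvPairs XZ ((N : Nat) : Int))),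
        c.1.length = k ∧ c.2.length = k := by
      intro c hc
      obtain ⟨h1, h2⟩ := pv_combos_len _ c hc
      simp [PySem.List.length_pyRange_one] at h1 h2
      constructor <;> omega
    rw [hsplit, List.foldl_append, List.foldl_cons, List.foldl_nil, ih1]
    simp only [List.map_append, List.map_cons, List.map_nil]
    rw [pv_combos_append_last]
    rw [show ((pvCombos ((PySem.List.pyRange 0 ((k : Nat) : Int) 1).map (pvPairs XZ ((N : Nat) : Int)))).map (pvT XZ N k)).foldl
        (fun nw t => nw ++ pvExpand ((N : Nat) : Int) ((k : Nat) : Int) t) [] =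
      [] ++ ((pvCombos ((PySem.List.pyRange 0 ((k : Nat) : Int) 1).map (pvPairs XZ ((N : Nat) : Int)))).map (pvT XZ N k)).flatMap
        (pvExpand ((N : Nat) : Int) ((k : Nat) : Int)) from
      PySem.List.foldl_append_eq_flatMap _ _ _]
    rw [List.nil_append, List.flatMap_map]
    rw [List.flatMap_congr (fun c hc => pv_expand_eq XZ N k c (hlen' c hc) hk hL)]
    rw [← List.map_flatMap]

-- the combination normal form folded into a set is B's final set of the frontier
theorem pv_form_eq_alt (N : Nat) (A : List Int) (hNA : N ≤ A.length) :
    pvCombosForm ((N : Nat) : Int) A = LCgraph_orbit_alt ((N : Nat) : Int) A := by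
  unfold pvCombosForm LCgraph_orbit_alt
  simp only []
  set XZ := (PySem.List.pyRange 0 ((N : Nat) : Int) 1).map (fun i => (1:Int) <<< i.toNat) ++ A with hXZ
  have hL : 2*N ≤ XZ.length := by
    rw [hXZ]; simp [PySem.List.length_pyRange_one]; omega
  have heyelen : ((PySem.List.pyRange 0 ((N : Nat) : Int) 1).map (fun i => (1:Int) <<< i.toNat)).length = N := by
    simp [PySem.List.length_pyRange_one]
  rw [heyelen, pv_stages XZ N hL N le_rfl]
  rw [show (2 * ((N : Nat) : Int)) = (((2*N : Nat)) : Int) from by norm_num,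
    PySem.List.slice_from_natCast]
  set cs := pvCombos ((PySem.List.pyRange 0 ((N : Nat) : Int) 1).map (pvPairs XZ ((N : Nat) : Int))) with hcs
  have hTeq : ∀ c ∈ cs, c.1 ++ c.2 ++ XZ.drop (2*N) = pvT XZ N N c := by
    intro c hc
    unfold pvT
    simp [show N + N = 2*N by omega, List.append_assoc]
  rw [show cs.foldl (fun orbit xz => PySem.Set.add orbit (xz.1 ++ xz.2 ++ XZ.drop (2*N))) [] =
      cs.foldl (fun orbit xz => PySem.Set.add orbit (pvT XZ N N xz)) [] from
    PySem.List.foldl_congr_mem _ _ _ _ (fun acc c hc => by rw [hTeq c hc])]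
  rw [← List.foldl_map, ← PySem.Set.ofList_eq_foldl]

-- ===== VERDICT (by name: the statement is the Claim_ definition above) =====
theorem LCgraph_orbit_spec : Claim_equal_LCgraph_orbit := by
  intro n A _ hpre
  unfold Spec_LCgraph_orbit
  by_cases hn : 0 ≤ n
  · obtain ⟨N, rfl⟩ := Int.eq_ofNat_of_zero_le hn
    unfold Pre_LCgraph_orbit at hpre
    rw [pv_main N A (by exact_mod_cast hpre)]
    exact pv_form_eq_alt N A (by exact_mod_cast hpre)
  · unfold LCgraph_orbit LCgraph_orbit_alt
    rw [PySem.List.pyRange_one_eq_nil (by omega : n ≤ 0)]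
    simp [pvProd, PySem.List.enumerate_nil]
    exact (PySem.Set.ofList_eq_self_of_nodup _ (by simp)).symm
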